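-- pv_equiv track=rewrite | github.com/Hugekyung/code-battle | test/test_3.py | max_substrings
-- ===== SOURCE A (Python) =====
-- def max_substrings(s):
--     count = 0  # 부분 문자열 개수
--     i = 0
--     n = len(s)
--
--     while i < n - 1:  # 최소 길이 2 이상이어야 하므로 마지막 문자 전까지만 탐색
--         for j in range(i + 1, n):  # i 이후부터 끝까지 탐색
--             if s[i] == s[j]:  # 시작과 끝이 같은 문자 찾기
--                 count += 1  # 부분 문자열 개수 증가
--                 i = j + 1  # 다음 부분 문자열 탐색을 위해 이동
--                 break
--         else:
--             i += 1  # 끝까지 탐색했지만 조건을 만족하는 부분 문자열을 못 찾으면 다음 문자로 이동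
--
--     return count
-- ===== SOURCE B (Python) =====
-- def max_substrings(s):
--     n = len(s)
--     # precompute nxt[i] = index of the next occurrence of s[i] after i, or None
--     last = {}
--     nxt = [None] * n
--     for i in range(n - 1, -1, -1):
--         nxt[i] = last.get(s[i])
--         last[s[i]] = i
--     count = 0
--     i = 0
--     while i < n - 1:
--         j = nxt[i]
--         if j is None:
--             i += 1
--         else:
--             count += 1
--             i = j + 1
--     return count
-- ===== Notes on version B (the rewrite author's own statement) =====
-- stated objective: alternative
-- what changed: B precomputes, in one right-to-left pass with a last-occurrence dict, the next index of each character, and then simulates the greedy walk by jumping via that table instead of rescanning the suffix at every position; this removes A's nested rescan (A is O(n^2) in the worst case, B is O(n)), though on the timed inputs A's rescans are short and no speed-up was measured.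
import Mathlib
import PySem

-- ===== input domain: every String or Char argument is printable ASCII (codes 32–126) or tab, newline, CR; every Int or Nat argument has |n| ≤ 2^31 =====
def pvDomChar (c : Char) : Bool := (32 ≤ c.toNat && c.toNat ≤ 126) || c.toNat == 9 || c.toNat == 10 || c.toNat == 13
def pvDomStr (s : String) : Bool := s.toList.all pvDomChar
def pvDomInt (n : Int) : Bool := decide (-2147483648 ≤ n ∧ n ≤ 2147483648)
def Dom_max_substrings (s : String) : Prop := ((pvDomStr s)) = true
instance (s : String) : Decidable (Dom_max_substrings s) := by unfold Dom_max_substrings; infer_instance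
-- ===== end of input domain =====

-- B replaces A's nested suffix rescan with a precomputed next-occurrence table and a jump walk (alternative algorithm).

-- ===== PORT A =====
-- inner `for j in range(i+1, n): if s[i]==s[j]: break` scan; returns the break index.
-- s[j] with 0 ≤ j < n never raises, so `getD j ' '` is exact here (index always in range).
def aScan (cs : List Char) (c : Char) (j n : Nat) : Option Nat :=
  if _h : j < n then
    if cs.getD j ' ' = c then some j else aScan cs c (j + 1) n
  else none
termination_by n - j

-- the `while i < n - 1` loop; fuel = n is enough since i strictly increases each
-- iteration (fuel only makes the recursion structural; it is never the exit reason).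
def aLoop (cs : List Char) (n : Nat) : Nat → Nat → Int → Int
  | 0, _, count => count
  | fuel + 1, i, count =>
    if i + 1 < n then
      match aScan cs (cs.getD i ' ') (i + 1) n with
      | some j => aLoop cs n fuel (j + 1) (count + 1)
      | none   => aLoop cs n fuel (i + 1) count
    else count

def max_substrings (s : String) : Int :=
  aLoop s.toList s.toList.length s.toList.length 0 0

-- ===== PORT B =====
-- `for i in range(n-1, -1, -1): nxt[i] = last.get(s[i]); last[s[i]] = i`
-- processed with k = i + 1 counting down; results are prepended, so acc ends in index order.
def bBuild (cs : List Char) : Nat → PySem.Dict Char Nat → List (Option Nat) → List (Option Nat)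
  | 0, _, acc => acc
  | k + 1, last, acc =>
      bBuild cs k (last.insert (cs.getD k ' ') k) ((last.get? (cs.getD k ' ')) :: acc)

-- the `while i < n - 1` jump loop of Source B; nxt[i] is always in range, so getD is exact.
def bLoop (nxt : List (Option Nat)) (n : Nat) : Nat → Nat → Int → Int
  | 0, _, count => count
  | fuel + 1, i, count =>
    if i + 1 < n then
      match nxt.getD i none with
      | some j => bLoop nxt n fuel (j + 1) (count + 1)
      | none   => bLoop nxt n fuel (i + 1) count
    else count

def max_substrings_alt (s : String) : Int :=
  let cs := s.toList
  let n := cs.length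
  let nxt := bBuild cs n (PySem.Dict.empty) []
  bLoop nxt n n 0 0

-- ===== PRECONDITION & SPEC =====
def Spec_max_substrings (s : String) (out : Int) : Prop := out = max_substrings_alt s
instance (s : String) (out : Int) : Decidable (Spec_max_substrings s out) := by unfold Spec_max_substrings; infer_instance

-- ===== CLAIM (what is proved, stated in full; the proofs are below) =====
def Claim_equal_max_substrings : Prop := ∀ (s : String), Dom_max_substrings s → Spec_max_substrings s (max_substrings s)

-- ===== LEMMAS AND PROOFS =====

-- invariant of the right-to-left dict: after processing indices k..n-1, the dict maps
-- each char c to the first index ≥ k holding c, i.e. exactly what A's inner scan finds.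
def NxtInv (cs : List Char) (k : Nat) (last : PySem.Dict Char Nat) : Prop :=
  ∀ c, last.get? c = aScan cs c k cs.length

theorem inv_top (cs : List Char) : NxtInv cs cs.length PySem.Dict.empty := by
  intro c
  rw [aScan]
  simp [PySem.Dict.get?_empty]

theorem inv_step (cs : List Char) (k : Nat) (hk : k < cs.length)
    (last : PySem.Dict Char Nat) (h : NxtInv cs (k + 1) last) :
    NxtInv cs k (last.insert (cs.getD k ' ') k) := by
  intro c
  rw [aScan, dif_pos hk, PySem.Dict.get?_insert]
  by_cases hc : cs.getD k ' ' = c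
  · subst hc; simp
  · rw [if_neg (fun hcc => hc hcc.symm), if_neg hc, h c]

theorem bBuild_eq (cs : List Char) :
    ∀ (k : Nat), k ≤ cs.length → ∀ (last : PySem.Dict Char Nat) (acc : List (Option Nat)),
      NxtInv cs k last →
      bBuild cs k last acc =
        ((List.range k).map (fun i => aScan cs (cs.getD i ' ') (i + 1) cs.length)) ++ acc := by
  intro k
  induction k with
  | zero => intro _ last acc _; simp [bBuild]
  | succ k ih =>
    intro hk last acc hinv
    have hklt : k < cs.length := hk
    rw [bBuild, ih (Nat.le_of_lt hklt) _ _ (inv_step cs k hklt last hinv),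
      hinv (cs.getD k ' '), List.range_succ]
    simp

theorem nxt_getD (cs : List Char) (i : Nat) (hi : i < cs.length) :
    (bBuild cs cs.length PySem.Dict.empty []).getD i none
      = aScan cs (cs.getD i ' ') (i + 1) cs.length := by
  rw [bBuild_eq cs cs.length (le_refl _) _ _ (inv_top cs)]
  simp [List.getD, hi]

theorem loops_eq (cs : List Char) :
    ∀ (fuel i : Nat) (count : Int),
      aLoop cs cs.length fuel i count
        = bLoop (bBuild cs cs.length PySem.Dict.empty []) cs.length fuel i count := by
  intro fuel
  induction fuel with
  | zero => intro i count; rfl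
  | succ fuel ih =>
    intro i count
    rw [aLoop, bLoop]
    by_cases hi : i + 1 < cs.length
    · have hi' : i < cs.length := Nat.lt_of_succ_lt hi
      rw [nxt_getD cs i hi', if_pos hi, if_pos hi]
      cases aScan cs (cs.getD i ' ') (i + 1) cs.length with
      | none => exact ih (i + 1) count
      | some j => exact ih (j + 1) (count + 1)
    · rw [if_neg hi, if_neg hi]

-- ===== VERDICT (by name: the statement is the Claim_ definition above) =====
theorem max_substrings_spec : Claim_equal_max_substrings := by
  intro s _
  unfold Spec_max_substrings max_substrings max_substrings_alt
  exact loops_eq s.toList s.toList.length 0 0
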